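-- pv_equiv track=rewrite | github.com/martinwjwilson/AoC | 2024/day-05/main.py | clean_puzzle_input
-- ===== SOURCE A (Python) =====
-- def clean_puzzle_input(puzzle_input: [str]) -> [[str]]:
--     sorted_input = []
--     temp_array = []
--     for element in puzzle_input:
--         if element == "":
--             sorted_input.append(temp_array)
--             temp_array = []
--         else:
--             temp_array.append(element)
--     sorted_input.append(temp_array)
--     return sorted_input
-- ===== SOURCE B (Python) =====
-- def clean_puzzle_input(puzzle_input: [str]) -> [[str]]:
--     # find-first-delimiter + slice + recurse, instead of a running accumulator
--     if "" not in puzzle_input: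
--         return [puzzle_input]
--     i = puzzle_input.index("")
--     return [puzzle_input[:i]] + clean_puzzle_input(puzzle_input[i + 1:])
-- ===== Notes on version B (the rewrite author's own statement) =====
-- stated objective: alternative
-- what changed: Replaces the single running-accumulator loop with a recursive find-first-delimiter-then-slice decomposition: locate the first "" with index, emit the prefix slice as a group, and recurse on the tail after the delimiter.
import Mathlib
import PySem

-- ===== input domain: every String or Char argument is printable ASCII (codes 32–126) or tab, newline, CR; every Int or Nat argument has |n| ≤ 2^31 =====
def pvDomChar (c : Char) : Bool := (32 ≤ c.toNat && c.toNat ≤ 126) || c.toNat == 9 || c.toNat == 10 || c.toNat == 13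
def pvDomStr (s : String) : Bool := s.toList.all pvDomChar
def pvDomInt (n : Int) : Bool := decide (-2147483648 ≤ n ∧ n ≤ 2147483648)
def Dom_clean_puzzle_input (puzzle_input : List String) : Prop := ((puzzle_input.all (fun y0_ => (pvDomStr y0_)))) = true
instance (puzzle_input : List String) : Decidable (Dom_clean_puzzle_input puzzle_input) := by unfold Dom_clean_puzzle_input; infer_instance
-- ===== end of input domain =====

-- B replaces A's running-accumulator loop with a recursive find-first-delimiter-then-slice decomposition (alternative, not faster).


-- ===== PORT A =====
-- literal transliteration: one fold over the input carrying (sorted_input, temp_array)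
def clean_puzzle_input (puzzle_input : List String) : List (List String) :=
  let st := puzzle_input.foldl
    (fun (acc : List (List String) × List String) element =>
      if element == "" then (acc.1 ++ [acc.2], ([] : List String))
      else (acc.1, acc.2 ++ [element]))
    (([] : List (List String)), ([] : List String))
  st.1 ++ [st.2]

-- ===== PORT B =====
-- transliteration of Source B: '"" in p' → membership test; 'p.index("")' → List.idxOf (index of the
-- first occurrence, which exists since "" ∈ p, so Python's .index raises nothing);
-- the slices p[:i] and p[i+1:] with 0 ≤ i < len p are exactly List.take i / List.drop (i+1).
def clean_puzzle_input_alt (puzzle_input : List String) : List (List String) :=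
  if h : "" ∈ puzzle_input then
    (puzzle_input.take (puzzle_input.idxOf "")) ::
      clean_puzzle_input_alt (puzzle_input.drop (puzzle_input.idxOf "" + 1))
  else
    [puzzle_input]
termination_by puzzle_input.length
decreasing_by
  have hne : puzzle_input ≠ [] := by rintro rfl; simp at h
  have : 0 < puzzle_input.length := List.length_pos_iff.mpr hne
  simp [List.length_drop]; omega

-- ===== PRECONDITION & SPEC =====
def Spec_clean_puzzle_input (puzzle_input : List String) (out : List (List String)) : Prop := out = clean_puzzle_input_alt puzzle_input
instance (puzzle_input : List String) (out : List (List String)) : Decidable (Spec_clean_puzzle_input puzzle_input out) := by unfold Spec_clean_puzzle_input; infer_instance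

-- ===== CLAIM (what is proved, stated in full; the proofs are below) =====
def Claim_equal_clean_puzzle_input : Prop := ∀ (puzzle_input : List String), Dom_clean_puzzle_input puzzle_input → Spec_clean_puzzle_input puzzle_input (clean_puzzle_input puzzle_input)

-- ===== LEMMAS AND PROOFS =====

theorem alt_ne_nil (p : List String) : clean_puzzle_input_alt p ≠ [] := by
  unfold clean_puzzle_input_alt
  split <;> simp

theorem alt_cons_delim (xs : List String) :
    clean_puzzle_input_alt ("" :: xs) = [] :: clean_puzzle_input_alt xs := by
  rw [clean_puzzle_input_alt]
  simp [List.idxOf, List.findIdx_cons]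

theorem alt_cons (x : String) (xs : List String) (hx : x ≠ "") :
    clean_puzzle_input_alt (x :: xs) =
      (clean_puzzle_input_alt xs).modifyHead (fun g => x :: g) := by
  have hb : (x == "") = false := by simpa using hx
  rw [clean_puzzle_input_alt]
  by_cases hm : "" ∈ xs
  · have hmem : "" ∈ x :: xs := List.mem_cons_of_mem _ hm
    have hidx : (x :: xs).idxOf "" = xs.idxOf "" + 1 := by
      simp [List.idxOf_cons, hb]
    rw [dif_pos hmem, hidx]
    conv_rhs => rw [clean_puzzle_input_alt, dif_pos hm]
    simp [List.modifyHead]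
  · have hnm : ¬ ("" ∈ x :: xs) := by
      simp [Ne.symm hx, hm]
    rw [dif_neg hnm]
    conv_rhs => rw [clean_puzzle_input_alt, dif_neg hm]
    simp [List.modifyHead]

-- loop invariant for A's fold: the final (sorted, temp) flattens to
-- sorted ++ (temp prepended onto the first group of B's result for the rest)
theorem loop_inv (p : List String) (sorted : List (List String)) (temp : List String) :
    (let st := p.foldl
      (fun (acc : List (List String) × List String) element =>
        if element == "" then (acc.1 ++ [acc.2], ([] : List String))
        else (acc.1, acc.2 ++ [element])) (sorted, temp)
     st.1 ++ [st.2]) =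
    sorted ++ (clean_puzzle_input_alt p).modifyHead (fun g => temp ++ g) := by
  induction p generalizing sorted temp with
  | nil =>
    rw [clean_puzzle_input_alt]
    simp
  | cons x xs ih =>
    by_cases hx : x = ""
    · subst hx
      simp only [List.foldl_cons]
      rw [ih, alt_cons_delim]
      obtain ⟨g, gs, hg⟩ := List.exists_cons_of_ne_nil (alt_ne_nil xs)
      simp [hg, List.modifyHead, List.append_assoc]
    · simp only [List.foldl_cons]
      rw [ih, alt_cons x xs hx]
      obtain ⟨g, gs, hg⟩ := List.exists_cons_of_ne_nil (alt_ne_nil xs)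
      simp [hg, List.modifyHead, hx]

-- ===== VERDICT (by name: the statement is the Claim_ definition above) =====
theorem clean_puzzle_input_spec : Claim_equal_clean_puzzle_input := by
  intro p _
  unfold Spec_clean_puzzle_input clean_puzzle_input
  have h := loop_inv p [] []
  simp only [List.nil_append] at h
  rw [h]
  obtain ⟨g, gs, hg⟩ := List.exists_cons_of_ne_nil (alt_ne_nil p)
  simp [hg, List.modifyHead]
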